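-- pv_equiv track=rewrite | github.com/bazarkua/Code-Signal-Solutions | Arcade/Intro/Smooth Sailing/All Longest String.py | solution
-- ===== SOURCE A (Python) =====
-- def solution(inputArray):
--
--     maxLen = 0
--     maxArray = []
--
--     for i in inputArray:
--         maxLen = max(len(i), maxLen)
--
--     for i in inputArray:
--         if len(i) == maxLen:
--             maxArray.append(i)
--
--     return maxArray
-- ===== SOURCE B (Python) =====
-- def solution(inputArray):
--     # single pass: keep current max length and its bucket, resetting on a longer string
--     maxLen = 0
--     best = []
--     for s in inputArray:
--         L = len(s)
--         if L > maxLen: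
--             maxLen = L
--             best = [s]
--         elif L == maxLen:
--             best.append(s)
--     return best
-- ===== Notes on version B (the rewrite author's own statement) =====
-- stated objective: faster
-- what changed: Replaces A's two passes (one to compute the max length, one to filter) with a single pass that keeps the current max length together with its bucket, resetting the bucket when a longer string appears.
import Mathlib
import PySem

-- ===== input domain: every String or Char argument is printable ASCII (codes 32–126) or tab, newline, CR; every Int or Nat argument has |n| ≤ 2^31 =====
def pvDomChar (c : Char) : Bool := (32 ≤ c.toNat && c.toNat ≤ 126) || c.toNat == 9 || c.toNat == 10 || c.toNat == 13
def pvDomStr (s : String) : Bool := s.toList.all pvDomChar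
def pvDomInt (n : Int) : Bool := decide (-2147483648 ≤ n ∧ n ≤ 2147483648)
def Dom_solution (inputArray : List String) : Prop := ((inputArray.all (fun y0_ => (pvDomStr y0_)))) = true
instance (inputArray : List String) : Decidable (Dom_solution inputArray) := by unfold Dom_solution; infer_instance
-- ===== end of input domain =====

-- ===== PORT A =====
-- B keeps only the running max and its bucket in one pass; equivalence of the return values is proved below.
def solution (inputArray : List String) : List String :=
  let maxLen : Int := inputArray.foldl (fun maxLen i => max (PySem.Str.len i) maxLen) 0
  inputArray.foldl (fun maxArray i => if PySem.Str.len i == maxLen then maxArray ++ [i] else maxArray) []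

-- ===== PORT B =====
def solution_alt (inputArray : List String) : List String :=
  (inputArray.foldl (fun (st : Int × List String) s =>
      let L := PySem.Str.len s
      if L > st.1 then (L, [s])
      else if L == st.1 then (st.1, st.2 ++ [s])
      else st) ((0 : Int), ([] : List String))).2

-- ===== PRECONDITION & SPEC =====
def Spec_solution (inputArray : List String) (out : List String) : Prop := out = solution_alt inputArray
instance (inputArray : List String) (out : List String) : Decidable (Spec_solution inputArray out) := by unfold Spec_solution; infer_instance

-- ===== CLAIM (what is proved, stated in full; the proofs are below) =====
def Claim_equal_solution : Prop := ∀ (inputArray : List String), Dom_solution inputArray → Spec_solution inputArray (solution inputArray)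

-- ===== LEMMAS AND PROOFS =====

-- the running max of A's first loop
def pvMaxLen (xs : List String) : Int := xs.foldl (fun m i => max (PySem.Str.len i) m) 0

theorem pvMaxLen_ge (xs : List String) : 0 ≤ pvMaxLen xs ∧ ∀ x ∈ xs, PySem.Str.len x ≤ pvMaxLen xs := by
  simpa [pvMaxLen, max_comm] using
    PySem.List.le_foldl_max_int xs (fun i => PySem.Str.len i) 0

-- invariant of B's single pass: the state is (running max, filter of the prefix at that max)
theorem pvAlt_inv (xs : List String) :
    xs.foldl (fun (st : Int × List String) s =>
      let L := PySem.Str.len s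
      if L > st.1 then (L, [s])
      else if L == st.1 then (st.1, st.2 ++ [s])
      else st) ((0 : Int), ([] : List String))
    = (pvMaxLen xs, xs.filter (fun i => PySem.Str.len i == pvMaxLen xs)) := by
  induction xs using List.reverseRecOn with
  | nil => simp [pvMaxLen]
  | append_singleton xs s ih =>
    have hM : pvMaxLen (xs ++ [s]) = max (s.length : Int) (pvMaxLen xs) := by
      simp [pvMaxLen, PySem.Str.len_eq]
    have hle : ∀ x ∈ xs, (x.length : Int) ≤ pvMaxLen xs := by
      have := (pvMaxLen_ge xs).2
      simpa [PySem.Str.len_eq] using this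
    rw [List.foldl_append, ih]
    simp only [List.foldl_cons, List.foldl_nil]
    by_cases hgt : ((s.length : Int) > pvMaxLen xs)
    · have hmax : pvMaxLen (xs ++ [s]) = (s.length : Int) := by
        rw [hM]; omega
      have hfilt : xs.filter (fun i => ((i.length : Int) == (s.length : Int))) = [] := by
        rw [List.filter_eq_nil_iff]
        intro x hx
        have := hle x hx
        simp only [beq_iff_eq]
        omega
      simp [PySem.Str.len_eq, hgt, hmax, List.filter_append, hfilt]
    · by_cases heq : ((s.length : Int) = pvMaxLen xs)
      · have hmax : pvMaxLen (xs ++ [s]) = pvMaxLen xs := by rw [hM]; omega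
        simp [PySem.Str.len_eq, hgt, heq, hmax, List.filter_append]
      · have hmax : pvMaxLen (xs ++ [s]) = pvMaxLen xs := by rw [hM]; omega
        simp [PySem.Str.len_eq, hgt, heq, hmax, List.filter_append]

-- ===== VERDICT (by name: the statement is the Claim_ definition above) =====
theorem solution_spec : Claim_equal_solution := by
  intro xs _
  show _ = _
  rw [solution, solution_alt, pvAlt_inv]
  rw [show xs.foldl (fun m i => max (PySem.Str.len i) m) 0 = pvMaxLen xs from rfl]
  simpa using PySem.List.foldl_append_if_eq_filter
    (fun i => PySem.Str.len i == pvMaxLen xs) (l := xs) (acc := [])
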